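-- pv_equiv track=rewrite | github.com/magnificentLee/Study | 알고리즘/그래프 이론, 탐색/1-50/6.태권왕 bfs.py | bfs
-- ===== SOURCE A (Python) =====
-- from collections import deque
--
-- def bfs(s, t):
--     count = 0
--     que = deque([[s, t, count]])
--     while que:
--         left, right, count = que.popleft()
--         if left < right:
--             que.append([left * 2, right + 3, count + 1])
--             que.append([left + 1, right, count + 1])
--         elif left == right:
--             break
--     return count
-- ===== SOURCE B (Python) =====
-- def bfs(s, t):
--     level = {(s, t)}
--     count = 0
--     while not any(l == r for l, r in level):
--         nxt = {q for l, r in level if l < r for q in ((l * 2, r + 3), (l + 1, r))}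
--         if not nxt:
--             return count
--         level = nxt
--         count += 1
--     return count
-- ===== Notes on version B (the rewrite author's own statement) =====
-- stated objective: alternative
-- what changed: Replaces the dedup-free FIFO queue of (left,right,count) nodes by level-synchronous deduplicated frontier SETS: the loop iterates over BFS depths, expanding each depth's distinct states once, instead of popping individual queue nodes carrying their own counters.
import Mathlib
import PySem

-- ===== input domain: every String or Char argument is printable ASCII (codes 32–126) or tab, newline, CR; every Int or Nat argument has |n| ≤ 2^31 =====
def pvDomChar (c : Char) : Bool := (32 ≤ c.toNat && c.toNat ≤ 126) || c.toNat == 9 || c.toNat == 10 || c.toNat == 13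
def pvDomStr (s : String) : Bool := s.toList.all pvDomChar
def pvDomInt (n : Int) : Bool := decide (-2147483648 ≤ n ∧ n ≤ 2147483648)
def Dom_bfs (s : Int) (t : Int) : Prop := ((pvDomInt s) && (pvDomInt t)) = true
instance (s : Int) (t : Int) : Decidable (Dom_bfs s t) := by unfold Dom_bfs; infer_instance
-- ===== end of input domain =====

-- B replaces A's dedup-free FIFO queue of (left,right,count) nodes by level-synchronous
-- deduplicated frontier sets, returning the same BFS depth.

-- ===== PORT A =====
-- A's while-loop over the deque, transliterated as fuel recursion; the deque is
-- the standard two-stack functional queue (front to pop from; back holds the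
-- appended nodes most-recent-first), so popleft/append are O(1) as in Python.
-- The fuel 2^((t-s).toNat + 1) is proved sufficient below (the loop pops at
-- most 2^(d+1) - 1 nodes, where d = depth of the first equal state ≤ max(t-s,0)).
def bfsLoop : Nat → List (Int × Int × Int) → List (Int × Int × Int) → Int → Int
  | 0, _, _, count => count
  | fuel + 1, (l, r, c) :: rest, back, _ =>
      if l < r then
        bfsLoop fuel rest ((l + 1, r, c + 1) :: (l * 2, r + 3, c + 1) :: back) c
      else if l = r then c
      else bfsLoop fuel rest back c
  | fuel + 1, [], back, count =>
      match back.reverse with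
      | [] => count
      | (l, r, c) :: rest =>
          if l < r then
            bfsLoop fuel rest [(l + 1, r, c + 1), (l * 2, r + 3, c + 1)] c
          else if l = r then c
          else bfsLoop fuel rest [] c

def bfs (s : Int) (t : Int) : Int :=
  bfsLoop (2 ^ ((t - s).toNat + 1)) [(s, t, 0)] [] 0

-- ===== PORT B =====
-- B's while-loop over the frontier set, transliterated as fuel recursion; the
-- fuel (t-s).toNat + 1 is proved sufficient below (the loop runs at most
-- max(t-s,0) + 1 times).
def bfsAltNext (level : PySem.Set (Int × Int)) : PySem.Set (Int × Int) :=
  PySem.Set.ofList (level.flatMap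
    (fun p => if p.1 < p.2 then [(p.1 * 2, p.2 + 3), (p.1 + 1, p.2)] else []))

def bfsAltLoop : Nat → PySem.Set (Int × Int) → Int → Int
  | 0, _, count => count
  | fuel + 1, level, count =>
      if level.any (fun p => p.1 == p.2) then count
      else
        let nxt := bfsAltNext level
        if nxt.isEmpty then count
        else bfsAltLoop fuel nxt (count + 1)

def bfs_alt (s : Int) (t : Int) : Int :=
  bfsAltLoop ((t - s).toNat + 1) (PySem.Set.ofList [(s, t)]) 0

-- ===== PRECONDITION & SPEC =====
def Spec_bfs (s : Int) (t : Int) (out : Int) : Prop := out = bfs_alt s t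
instance (s : Int) (t : Int) (out : Int) : Decidable (Spec_bfs s t out) := by unfold Spec_bfs; infer_instance

-- ===== CLAIM (what is proved, stated in full; the proofs are below) =====
def Claim_equal_bfs : Prop := ∀ (s : Int) (t : Int), Dom_bfs s t → Spec_bfs s t (bfs s t)

-- ===== LEMMAS AND PROOFS =====

-- children of one state, exactly the expansion both loops perform
def child (p : Int × Int) : List (Int × Int) :=
  if p.1 < p.2 then [(p.1 * 2, p.2 + 3), (p.1 + 1, p.2)] else []

-- the BFS levels (as lists with repetition): Lv s t k = states at depth k
def Lv (s t : Int) : Nat → List (Int × Int)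
  | 0 => [(s, t)]
  | k + 1 => (Lv s t k).flatMap child

abbrev hasEq (L : List (Int × Int)) : Prop := ∃ p ∈ L, p.1 = p.2

lemma child_mem_succ {p : Int × Int} (h : p.1 < p.2) :
    (p.1 + 1, p.2) ∈ child p := by simp [child, h]

lemma mem_Lv_succ {s t : Int} {k : Nat} {p q : Int × Int}
    (hp : p ∈ Lv s t k) (hq : q ∈ child p) : q ∈ Lv s t (k + 1) := by
  simp only [Lv, List.mem_flatMap]
  exact ⟨p, hp, hq⟩

-- equality is reachable: below any state (l,r) with l ≤ r there is an equal pair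
lemma hasEq_of_mem (s t : Int) :
    ∀ (g : Nat) (k : Nat) (p : Int × Int), p ∈ Lv s t k → p.2 - p.1 = (g : Int) →
      hasEq (Lv s t (k + g)) := by
  intro g
  induction g with
  | zero =>
      intro k p hp hg
      exact ⟨p, hp, by omega⟩
  | succ n ih =>
      intro k p hp hg
      have hlt : p.1 < p.2 := by omega
      have hmem : (p.1 + 1, p.2) ∈ Lv s t (k + 1) :=
        mem_Lv_succ hp (child_mem_succ hlt)
      have := ih (k + 1) (p.1 + 1, p.2) hmem (by push_cast; omega)
      rwa [show k + 1 + n = k + (n + 1) from by omega] at this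

lemma hasEq_toNat {s t : Int} (hst : s ≤ t) : hasEq (Lv s t (t - s).toNat) := by
  have := hasEq_of_mem s t (t - s).toNat 0 (s, t) (by simp [Lv]) (by simp; omega)
  simpa using this

lemma exists_hasEq {s t : Int} (hst : s ≤ t) : ∃ k, hasEq (Lv s t k) :=
  ⟨(t - s).toNat, hasEq_toNat hst⟩

-- levels grow at most by a factor 2
lemma length_Lv_le (s t : Int) : ∀ k, (Lv s t k).length ≤ 2 ^ k := by
  intro k
  induction k with
  | zero => simp [Lv]
  | succ n ih =>
      have h1 : (Lv s t (n + 1)).length ≤ 2 * (Lv s t n).length := by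
        show ((Lv s t n).flatMap child).length ≤ 2 * (Lv s t n).length
        induction Lv s t n with
        | nil => simp
        | cons p L ihL =>
            have : (child p).length ≤ 2 := by unfold child; split <;> simp
            simp only [List.flatMap_cons, List.length_append, List.length_cons]
            omega
      calc (Lv s t (n + 1)).length ≤ 2 * (Lv s t n).length := h1
        _ ≤ 2 * 2 ^ n := by omega
        _ = 2 ^ (n + 1) := by ring

-- empty levels stay empty
lemma Lv_ne_nil_of_le {s t : Int} {j m : Nat} (hjm : j ≤ m) (hm : hasEq (Lv s t m)) :
    Lv s t j ≠ [] := by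
  intro hnil
  have hprop : ∀ n, Lv s t (j + n) = [] := by
    intro n
    induction n with
    | zero => exact hnil
    | succ i ih => simp [Lv, ih]
  obtain ⟨p, hp, _⟩ := hm
  rw [show m = j + (m - j) from by omega, hprop (m - j)] at hp
  exact (List.not_mem_nil) hp

-- remaining work after level k: total size of levels k+1 .. d
def tailLen (s t : Int) (d : Nat) (k : Nat) : Nat :=
  ∑ i ∈ Finset.range (d - k), (Lv s t (k + 1 + i)).length

lemma tailLen_succ (s t : Int) {d k : Nat} (hk : k < d) :
    tailLen s t d k = (Lv s t (k + 1)).length + tailLen s t d (k + 1) := by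
  have hcongr : (∑ i ∈ Finset.range (d - (k + 1)), (Lv s t (k + 1 + (i + 1))).length)
      = ∑ i ∈ Finset.range (d - (k + 1)), (Lv s t (k + 1 + 1 + i)).length := by
    refine Finset.sum_congr rfl ?_
    intro i _
    rw [show k + 1 + (i + 1) = k + 1 + 1 + i from by omega]
  unfold tailLen
  rw [show d - k = (d - (k + 1)) + 1 from by omega, Finset.sum_range_succ', hcongr]
  simp only [Nat.add_zero]
  omega

lemma tailLen_le (s t : Int) (d : Nat) :
    tailLen s t d 0 + 2 ≤ 2 ^ (d + 1) := by
  unfold tailLen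
  simp only [Nat.sub_zero]
  induction d with
  | zero => simp
  | succ n ih =>
      rw [Finset.sum_range_succ]
      have h1 := length_Lv_le s t (0 + 1 + n)
      have h2 : (2 : Nat) ^ (0 + 1 + n) ≤ 2 ^ (n + 1) := by
        apply Nat.pow_le_pow_right <;> omega
      have h3 : (2 : Nat) ^ (n + 1) + 2 ^ (n + 1) = 2 ^ (n + 1 + 1) := by ring
      omega

-- one-list view of A's deque (proof helper): the queue as a single list
def bfsLoopList : Nat → List (Int × Int × Int) → Int → Int
  | 0, _, count => count
  | _ + 1, [], count => count
  | fuel + 1, (l, r, c) :: rest, _ =>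
      if l < r then
        bfsLoopList fuel (rest ++ [(l * 2, r + 3, c + 1), (l + 1, r, c + 1)]) c
      else if l = r then c
      else bfsLoopList fuel rest c

-- the two-stack queue represents front ++ back.reverse
lemma bfsLoop_eq_list :
    ∀ (fuel : Nat) (front back : List (Int × Int × Int)) (c : Int),
      bfsLoop fuel front back c = bfsLoopList fuel (front ++ back.reverse) c := by
  intro fuel
  induction fuel with
  | zero => intro front back c; rfl
  | succ f ih =>
      intro front back c
      cases front with
      | cons p rest =>
          obtain ⟨l, r, c'⟩ := p
          show (if l < r then
                  bfsLoop f rest ((l + 1, r, c' + 1) :: (l * 2, r + 3, c' + 1) :: back) c'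
                else if l = r then c'
                else bfsLoop f rest back c')
              = (if l < r then
                  bfsLoopList f ((rest ++ back.reverse) ++
                    [(l * 2, r + 3, c' + 1), (l + 1, r, c' + 1)]) c'
                else if l = r then c'
                else bfsLoopList f (rest ++ back.reverse) c')
          by_cases h1 : l < r
          · rw [if_pos h1, if_pos h1, ih]
            congr 1
            simp [List.reverse_cons, List.append_assoc]
          · by_cases h2 : l = r
            · rw [if_neg h1, if_neg h1, if_pos h2, if_pos h2]
            · rw [if_neg h1, if_neg h1, if_neg h2, if_neg h2, ih]
      | nil =>
          rw [show bfsLoop (f + 1) [] back c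
              = (match back.reverse with
                 | [] => c
                 | (l, r, c') :: rest =>
                     if l < r then
                       bfsLoop f rest [(l + 1, r, c' + 1), (l * 2, r + 3, c' + 1)] c'
                     else if l = r then c'
                     else bfsLoop f rest [] c') from rfl]
          rw [List.nil_append]
          cases hb : back.reverse with
          | nil => rfl
          | cons p rest =>
              obtain ⟨l, r, c'⟩ := p
              show (if l < r then
                      bfsLoop f rest [(l + 1, r, c' + 1), (l * 2, r + 3, c' + 1)] c'
                    else if l = r then c'
                    else bfsLoop f rest [] c')
                  = (if l < r then
                      bfsLoopList f (rest ++
                        [(l * 2, r + 3, c' + 1), (l + 1, r, c' + 1)]) c'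
                    else if l = r then c'
                    else bfsLoopList f rest c')
              by_cases h1 : l < r
              · rw [if_pos h1, if_pos h1, ih]
                rfl
              · by_cases h2 : l = r
                · rw [if_neg h1, if_neg h1, if_pos h2, if_pos h2]
                · rw [if_neg h1, if_neg h1, if_neg h2, if_neg h2, ih]
                  simp

-- ===== correctness of A's loop: it returns the least depth with an equal pair =====
lemma A_run (s t : Int) (h : ∃ k, hasEq (Lv s t k)) :
    ∀ (n k : Nat), k + n = Nat.find h →
    ∀ (X P : List (Int × Int)) (fuel : Nat) (c : Int),
      Lv s t k = P ++ X →
      (∀ p ∈ P, p.1 ≠ p.2) →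
      X.length + tailLen s t (Nat.find h) k ≤ fuel →
      bfsLoopList fuel
        (X.map (fun p => (p.1, p.2, (k : Int))) ++
         (P.flatMap child).map (fun p => (p.1, p.2, (k : Int) + 1))) c
        = (Nat.find h : Int) := by
  intro n
  induction n with
  | zero =>
      intro k hk X
      induction X with
      | nil =>
          intro P fuel c hsplit hnoP hfuel
          exfalso
          obtain ⟨p, hp, hpe⟩ := Nat.find_spec h
          rw [show Nat.find h = k from by omega, hsplit, List.append_nil] at hp
          exact hnoP p hp hpe
      | cons p X' ihX =>
          intro P fuel c hsplit hnoP hfuel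
          cases fuel with
          | zero => exfalso; simp at hfuel
          | succ f =>
              rw [List.map_cons, List.cons_append]
              show bfsLoopList (f + 1) ((p.1, p.2, (k : Int)) :: _) c = _
              by_cases hlt : p.1 < p.2
              · rw [show bfsLoopList (f + 1) ((p.1, p.2, (k : Int)) ::
                      (X'.map (fun p => (p.1, p.2, (k : Int))) ++
                       (P.flatMap child).map (fun p => (p.1, p.2, (k : Int) + 1)))) c
                    = bfsLoopList f ((X'.map (fun p => (p.1, p.2, (k : Int))) ++
                       (P.flatMap child).map (fun p => (p.1, p.2, (k : Int) + 1))) ++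
                       [(p.1 * 2, p.2 + 3, (k : Int) + 1), (p.1 + 1, p.2, (k : Int) + 1)]) (k : Int)
                    from by simp [bfsLoopList, hlt]]
                have hshape : (X'.map (fun p => (p.1, p.2, (k : Int))) ++
                       (P.flatMap child).map (fun p => (p.1, p.2, (k : Int) + 1))) ++
                       [(p.1 * 2, p.2 + 3, (k : Int) + 1), (p.1 + 1, p.2, (k : Int) + 1)]
                    = X'.map (fun p => (p.1, p.2, (k : Int))) ++
                      ((P ++ [p]).flatMap child).map (fun p => (p.1, p.2, (k : Int) + 1)) := by
                  rw [List.flatMap_append, List.flatMap_cons, List.flatMap_nil,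
                    List.append_nil, List.map_append, List.append_assoc]
                  simp [child, hlt]
                rw [hshape]
                apply ihX (P ++ [p]) f (k : Int)
                · rw [hsplit, List.append_assoc]; rfl
                · intro q hq
                  rcases List.mem_append.1 hq with hq | hq
                  · exact hnoP q hq
                  · have : q = p := by simpa using hq
                    subst this; omega
                · simp only [List.length_cons] at hfuel; omega
              · by_cases hpe : p.1 = p.2
                · rw [show bfsLoopList (f + 1) ((p.1, p.2, (k : Int)) :: _) c = (k : Int)
                      from by simp [bfsLoopList, hpe]]
                  have hp : p ∈ Lv s t k := by rw [hsplit]; simp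
                  have := Nat.find_min' h ⟨p, hp, hpe⟩
                  omega
                · rw [show bfsLoopList (f + 1) ((p.1, p.2, (k : Int)) ::
                        (X'.map (fun p => (p.1, p.2, (k : Int))) ++
                         (P.flatMap child).map (fun p => (p.1, p.2, (k : Int) + 1)))) c
                      = bfsLoopList f (X'.map (fun p => (p.1, p.2, (k : Int))) ++
                         (P.flatMap child).map (fun p => (p.1, p.2, (k : Int) + 1))) (k : Int)
                      from by simp [bfsLoopList, hlt, hpe]]
                  have hshape : (P.flatMap child) = (P ++ [p]).flatMap child := by
                    rw [List.flatMap_append, List.flatMap_cons, List.flatMap_nil,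
                      List.append_nil]
                    simp [child, hlt]
                  rw [hshape]
                  apply ihX (P ++ [p]) f (k : Int)
                  · rw [hsplit, List.append_assoc]; rfl
                  · intro q hq
                    rcases List.mem_append.1 hq with hq | hq
                    · exact hnoP q hq
                    · have : q = p := by simpa using hq
                      subst this; exact hpe
                  · simp only [List.length_cons] at hfuel; omega
  | succ m ihn =>
      intro k hk X
      induction X with
      | nil =>
          intro P fuel c hsplit hnoP hfuel
          have hP : P = Lv s t k := by rw [hsplit, List.append_nil]
          have hnext : P.flatMap child = Lv s t (k + 1) := by rw [hP]; rfl
          have hcast : ((k + 1 : Nat) : Int) = (k : Int) + 1 := by push_cast; ring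
          have := ihn (k + 1) (by omega) (Lv s t (k + 1)) [] fuel c rfl
            (by intro q hq; exact absurd hq (List.not_mem_nil))
            (by
              rw [tailLen_succ s t (show k < Nat.find h from by omega)] at hfuel
              simp only [List.length_nil] at hfuel ⊢
              omega)
          rw [List.flatMap_nil, List.map_nil, List.append_nil, hcast] at this
          rw [List.map_nil, List.nil_append, hnext]
          exact this
      | cons p X' ihX =>
          intro P fuel c hsplit hnoP hfuel
          cases fuel with
          | zero => exfalso; simp at hfuel
          | succ f =>
              rw [List.map_cons, List.cons_append]
              by_cases hlt : p.1 < p.2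
              · rw [show bfsLoopList (f + 1) ((p.1, p.2, (k : Int)) ::
                      (X'.map (fun p => (p.1, p.2, (k : Int))) ++
                       (P.flatMap child).map (fun p => (p.1, p.2, (k : Int) + 1)))) c
                    = bfsLoopList f ((X'.map (fun p => (p.1, p.2, (k : Int))) ++
                       (P.flatMap child).map (fun p => (p.1, p.2, (k : Int) + 1))) ++
                       [(p.1 * 2, p.2 + 3, (k : Int) + 1), (p.1 + 1, p.2, (k : Int) + 1)]) (k : Int)
                    from by simp [bfsLoopList, hlt]]
                have hshape : (X'.map (fun p => (p.1, p.2, (k : Int))) ++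
                       (P.flatMap child).map (fun p => (p.1, p.2, (k : Int) + 1))) ++
                       [(p.1 * 2, p.2 + 3, (k : Int) + 1), (p.1 + 1, p.2, (k : Int) + 1)]
                    = X'.map (fun p => (p.1, p.2, (k : Int))) ++
                      ((P ++ [p]).flatMap child).map (fun p => (p.1, p.2, (k : Int) + 1)) := by
                  rw [List.flatMap_append, List.flatMap_cons, List.flatMap_nil,
                    List.append_nil, List.map_append, List.append_assoc]
                  simp [child, hlt]
                rw [hshape]
                apply ihX (P ++ [p]) f (k : Int)
                · rw [hsplit, List.append_assoc]; rfl
                · intro q hq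
                  rcases List.mem_append.1 hq with hq | hq
                  · exact hnoP q hq
                  · have : q = p := by simpa using hq
                    subst this; omega
                · simp only [List.length_cons] at hfuel; omega
              · by_cases hpe : p.1 = p.2
                · rw [show bfsLoopList (f + 1) ((p.1, p.2, (k : Int)) :: _) c = (k : Int)
                      from by simp [bfsLoopList, hpe]]
                  have hp : p ∈ Lv s t k := by rw [hsplit]; simp
                  have := Nat.find_min' h ⟨p, hp, hpe⟩
                  omega
                · rw [show bfsLoopList (f + 1) ((p.1, p.2, (k : Int)) ::
                        (X'.map (fun p => (p.1, p.2, (k : Int))) ++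
                         (P.flatMap child).map (fun p => (p.1, p.2, (k : Int) + 1)))) c
                      = bfsLoopList f (X'.map (fun p => (p.1, p.2, (k : Int))) ++
                         (P.flatMap child).map (fun p => (p.1, p.2, (k : Int) + 1))) (k : Int)
                      from by simp [bfsLoopList, hlt, hpe]]
                  have hshape : (P.flatMap child) = (P ++ [p]).flatMap child := by
                    rw [List.flatMap_append, List.flatMap_cons, List.flatMap_nil,
                      List.append_nil]
                    simp [child, hlt]
                  rw [hshape]
                  apply ihX (P ++ [p]) f (k : Int)
                  · rw [hsplit, List.append_assoc]; rfl
                  · intro q hq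
                    rcases List.mem_append.1 hq with hq | hq
                    · exact hnoP q hq
                    · have : q = p := by simpa using hq
                      subst this; exact hpe
                  · simp only [List.length_cons] at hfuel; omega

-- ===== correctness of B's loop =====
lemma B_run (s t : Int) (h : ∃ k, hasEq (Lv s t k)) :
    ∀ (fuel k : Nat) (S : List (Int × Int)),
      (∀ x, x ∈ S ↔ x ∈ Lv s t k) →
      k ≤ Nat.find h →
      Nat.find h - k < fuel →
      bfsAltLoop fuel S (k : Int) = (Nat.find h : Int) := by
  intro fuel
  induction fuel with
  | zero => intro k S hmem hk hf; omega
  | succ f ih =>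
      intro k S hmem hk hf
      by_cases hany : ∃ p ∈ S, p.1 = p.2
      · have hb : S.any (fun p => p.1 == p.2) = true := by
          obtain ⟨p, hp, he⟩ := hany
          exact List.any_eq_true.2 ⟨p, hp, by simpa using he⟩
        have hdk : Nat.find h ≤ k := by
          obtain ⟨p, hp, he⟩ := hany
          exact Nat.find_min' h ⟨p, (hmem p).1 hp, he⟩
        have hkd : k = Nat.find h := by omega
        simp [bfsAltLoop, hb, hkd]
      · have hb : S.any (fun p => p.1 == p.2) = false := by
          simp only [List.any_eq_false]
          intro p hp
          simp only [beq_iff_eq]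
          exact fun he => hany ⟨p, hp, he⟩
        have hne : k ≠ Nat.find h := by
          intro hkd
          obtain ⟨p, hp, he⟩ := Nat.find_spec h
          rw [← hkd] at hp
          exact hany ⟨p, (hmem p).2 hp, he⟩
        have hklt : k < Nat.find h := lt_of_le_of_ne hk hne
        have hmem' : ∀ x, x ∈ bfsAltNext S ↔ x ∈ Lv s t (k + 1) := by
          intro x
          unfold bfsAltNext
          rw [PySem.Set.mem_ofList, List.mem_flatMap]
          show (∃ p ∈ S, x ∈ _) ↔ x ∈ Lv s t (k + 1)
          simp only [Lv, List.mem_flatMap, child]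
          constructor
          · rintro ⟨p, hp, hx⟩
            exact ⟨p, (hmem p).1 hp, hx⟩
          · rintro ⟨p, hp, hx⟩
            exact ⟨p, (hmem p).2 hp, hx⟩
        have hnonempty : bfsAltNext S ≠ [] := by
          have hLne := Lv_ne_nil_of_le (show k + 1 ≤ Nat.find h from by omega) (Nat.find_spec h)
          intro hcon
          cases hLv : Lv s t (k + 1) with
          | nil => exact hLne hLv
          | cons q L =>
              have hq : q ∈ bfsAltNext S := (hmem' q).2 (by rw [hLv]; simp)
              rw [hcon] at hq
              exact (List.not_mem_nil) hq
        have hie : (bfsAltNext S).isEmpty = false := by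
          cases hx : bfsAltNext S with
          | nil => exact absurd hx hnonempty
          | cons q L => simp
        have hstep : bfsAltLoop (f + 1) S (k : Int)
            = bfsAltLoop f (bfsAltNext S) ((k : Int) + 1) := by
          simp [bfsAltLoop, hb, hie]
        rw [hstep, show (k : Int) + 1 = ((k + 1 : Nat) : Int) from by push_cast; ring]
        exact ih (k + 1) (bfsAltNext S) hmem' (by omega) (by omega)

-- ===== VERDICT (by name: the statement is the Claim_ definition above) =====
theorem bfs_spec : Claim_equal_bfs := by
  intro s t _
  unfold Spec_bfs
  by_cases hst : s ≤ t
  · have h := exists_hasEq hst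
    have hdle : Nat.find h ≤ (t - s).toNat := Nat.find_min' h (hasEq_toNat hst)
    have hA : bfs s t = (Nat.find h : Int) := by
      have := A_run s t h (Nat.find h) 0 (by omega) [(s, t)] [] (2 ^ ((t - s).toNat + 1)) 0
        (by simp [Lv]) (by simp)
        (by
          have h1 := tailLen_le s t (Nat.find h)
          have h2 : (2 : Nat) ^ (Nat.find h + 1) ≤ 2 ^ ((t - s).toNat + 1) :=
            Nat.pow_le_pow_right (by omega) (by omega)
          simp only [List.length_cons, List.length_nil]
          omega)
      rw [bfs, bfsLoop_eq_list]
      simpa using this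
    have hB : bfs_alt s t = (Nat.find h : Int) := by
      have := B_run s t h ((t - s).toNat + 1) 0 [(s, t)]
        (by intro x; simp [Lv]) (by omega) (by omega)
      have hone : PySem.Set.ofList [((s : Int), t)] = [(s, t)] :=
        PySem.Set.ofList_eq_self_of_nodup _ (List.nodup_singleton _)
      simpa [bfs_alt, hone] using this
    rw [hA, hB]
  · -- s > t: A pops the single state, appends nothing and returns 0;
    -- B finds no equal pair, an empty next frontier, and returns 0.
    have h1 : ¬ s < t := by omega
    have h2 : ¬ s = t := by omega
    have hz : (t - s).toNat = 0 := by omega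
    have hone : PySem.Set.ofList [((s : Int), t)] = [(s, t)] :=
      PySem.Set.ofList_eq_self_of_nodup _ (List.nodup_singleton _)
    rw [bfs, bfs_alt, hz, hone]
    norm_num
    show bfsLoop (1 + 1) [(s, t, 0)] [] 0 = bfsAltLoop (0 + 1) [(s, t)] 0
    simp [bfsLoop, bfsAltLoop, bfsAltNext, h1, h2]
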